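-- pv_equiv track=rewrite | github.com/mukibi/joe_project2 | extract_eyetv.py | is_movie_file
-- ===== SOURCE A (Python) =====
-- video_file_extensions = {
-- ".3g2":"3GPP2",
-- ".3gp":"3GPP",
-- ".amv":"AMV video format",
-- ".asf":"Advanced Systems Format (ASF)",
-- ".avi":"AVI",
-- ".drc":"Dirac",
--
-- ".f4v":"Flash Video (FLV)",
-- ".flv":"Flash Video (FLV)",
-- ".f4p":"Flash Video (FLV)",
-- ".f4a":"F4V",
-- ".f4b":"F4V",
--
-- ".gif":"GIF",
-- ".gifv":"Video alternative to GIF",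
-- ".m4v":"M4V - (file format for videos for iPods and PlayStation Portables developed by Apple)",
-- ".mkv":"Matroska",
-- ".mng":"Multiple-image Network Graphics",
--
-- ".mov":"QuickTime File Format",
-- ".qt":"QuickTime File Format",
--
-- ".mp4":"MPEG-4 Part 14 (MP4)",
-- ".m4p":"MPEG-4 Part 14 (MP4)",
-- ".m4v":"MPEG-4 Part 14 (MP4)",
--
-- #".mpg":"MPEG-1",
-- ".mp2":"MPEG-1",
-- ".mpg":"MPEG-1",
-- ".mpeg":"MPEG-1",
-- ".mpe":"MPEG-1",
-- ".mpv":"MPEG-1",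
--
-- ".mxf":"Material Exchange Format (MXF)",
-- ".nsv":"Nullsoft Streaming Video (NSV)",
--
-- ".ogv":"Ogg Video",
-- ".ogg":"Ogg Video",
--
-- ".rm":"RealMedia (RM)",
-- ".rmvb":"RealMedia Variable Bitrate (RMVB)",
-- ".roq":"ROQ",
-- ".svi":"SVI",
--
-- ".vob":"Vob",
-- ".webm":"WebM",
-- ".wmv":"Windows Media Video",
-- ".yuv":"Raw video format"
--
-- }
--
-- def is_movie_file(file_n):
--
-- 	movie_ext = None
--
-- 	for file_extension in video_file_extensions:
--
-- 		ext_len = len(file_extension)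
-- 		file_n_tail = file_n[-ext_len:]
--
-- 		if (file_extension == file_n_tail.lower()):
-- 			movie_ext = file_n_tail
-- 			break
--
-- 	return movie_ext
-- ===== SOURCE B (Python) =====
-- video_file_extensions = {
-- ".3g2":"3GPP2",
-- ".3gp":"3GPP",
-- ".amv":"AMV video format",
-- ".asf":"Advanced Systems Format (ASF)",
-- ".avi":"AVI",
-- ".drc":"Dirac",
--
-- ".f4v":"Flash Video (FLV)",
-- ".flv":"Flash Video (FLV)",
-- ".f4p":"Flash Video (FLV)",
-- ".f4a":"F4V",
-- ".f4b":"F4V",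
--
-- ".gif":"GIF",
-- ".gifv":"Video alternative to GIF",
-- ".m4v":"M4V - (file format for videos for iPods and PlayStation Portables developed by Apple)",
-- ".mkv":"Matroska",
-- ".mng":"Multiple-image Network Graphics",
--
-- ".mov":"QuickTime File Format",
-- ".qt":"QuickTime File Format",
--
-- ".mp4":"MPEG-4 Part 14 (MP4)",
-- ".m4p":"MPEG-4 Part 14 (MP4)",
-- ".m4v":"MPEG-4 Part 14 (MP4)",
--
-- ".mp2":"MPEG-1",
-- ".mpg":"MPEG-1",
-- ".mpeg":"MPEG-1",
-- ".mpe":"MPEG-1",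
-- ".mpv":"MPEG-1",
--
-- ".mxf":"Material Exchange Format (MXF)",
-- ".nsv":"Nullsoft Streaming Video (NSV)",
--
-- ".ogv":"Ogg Video",
-- ".ogg":"Ogg Video",
--
-- ".rm":"RealMedia (RM)",
-- ".rmvb":"RealMedia Variable Bitrate (RMVB)",
-- ".roq":"ROQ",
-- ".svi":"SVI",
--
-- ".vob":"Vob",
-- ".webm":"WebM",
-- ".wmv":"Windows Media Video",
-- ".yuv":"Raw video format"
-- }
--
-- def is_movie_file(file_n):
--     # Locate the last dot and look up that extension directly, instead of
--     # comparing every known extension against a sliced tail.  Correct because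
--     # every key starts with '.' and contains no further dot, so a matching
--     # tail is exactly the substring from the last dot.
--     idx = file_n.rfind('.')
--     if idx == -1:
--         return None
--     ext = file_n[idx:]
--     return ext if ext.lower() in video_file_extensions else None
-- ===== Notes on version B (the rewrite author's own statement) =====
-- stated objective: idiomatic
-- what changed: B computes the candidate extension once, from the position of the last dot in the filename, and does a single dict-membership lookup, instead of A's scan over all 40 extension keys with a slice+lower+compare per key; correct because every key starts with a dot and contains no further dot.
import Mathlib
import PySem

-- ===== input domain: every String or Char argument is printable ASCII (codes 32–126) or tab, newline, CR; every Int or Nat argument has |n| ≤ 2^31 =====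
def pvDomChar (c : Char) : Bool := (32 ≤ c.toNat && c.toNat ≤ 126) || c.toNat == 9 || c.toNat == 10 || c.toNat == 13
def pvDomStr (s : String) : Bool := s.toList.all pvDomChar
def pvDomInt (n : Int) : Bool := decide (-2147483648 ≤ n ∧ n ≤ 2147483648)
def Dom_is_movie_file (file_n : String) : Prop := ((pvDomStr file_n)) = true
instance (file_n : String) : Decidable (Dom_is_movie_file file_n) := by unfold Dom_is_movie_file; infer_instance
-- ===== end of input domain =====

-- B replaces A's scan over all 40 extension keys (slice + lower + compare each) by computing the
-- extension once from the last '.' (rfind) and doing a single dict-membership lookup.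

-- ===== PORT A =====
-- the keys of video_file_extensions in dict (insertion) order; the duplicate ".m4v" keeps its first position
def pvExts : List String :=
  [".3g2", ".3gp", ".amv", ".asf", ".avi", ".drc",
   ".f4v", ".flv", ".f4p", ".f4a", ".f4b",
   ".gif", ".gifv", ".m4v", ".mkv", ".mng",
   ".mov", ".qt",
   ".mp4", ".m4p",
   ".mp2", ".mpg", ".mpeg", ".mpe", ".mpv",
   ".mxf", ".nsv",
   ".ogv", ".ogg",
   ".rm", ".rmvb", ".roq", ".svi",
   ".vob", ".webm", ".wmv", ".yuv"]

-- A's for-loop over the keys with break: first key equal to the lowercased tail wins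
def pvLoopA (L : List Char) : List String → Option String
  | [] => none
  | e :: rest =>
      let t := PySem.List.slice L (some (-(e.toList.length : Int))) none
      if PySem.Chars.lower t = e.toList then some (String.ofList t) else pvLoopA L rest

def is_movie_file (file_n : String) : Option String := pvLoopA file_n.toList pvExts

-- ===== PORT B =====
-- the module-level dict video_file_extensions itself (keys as char lists; the duplicate ".m4v"
-- literal overwrites the value and keeps the first position, as Python dict literals do)
def pvVideoDict : PySem.Dict (List Char) String :=
  PySem.Dict.ofList [
    (".3g2".toList, "3GPP2"),
    (".3gp".toList, "3GPP"),
    (".amv".toList, "AMV video format"),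
    (".asf".toList, "Advanced Systems Format (ASF)"),
    (".avi".toList, "AVI"),
    (".drc".toList, "Dirac"),
    (".f4v".toList, "Flash Video (FLV)"),
    (".flv".toList, "Flash Video (FLV)"),
    (".f4p".toList, "Flash Video (FLV)"),
    (".f4a".toList, "F4V"),
    (".f4b".toList, "F4V"),
    (".gif".toList, "GIF"),
    (".gifv".toList, "Video alternative to GIF"),
    (".m4v".toList, "M4V - (file format for videos for iPods and PlayStation Portables developed by Apple)"),
    (".mkv".toList, "Matroska"),
    (".mng".toList, "Multiple-image Network Graphics"),
    (".mov".toList, "QuickTime File Format"),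
    (".qt".toList, "QuickTime File Format"),
    (".mp4".toList, "MPEG-4 Part 14 (MP4)"),
    (".m4p".toList, "MPEG-4 Part 14 (MP4)"),
    (".m4v".toList, "MPEG-4 Part 14 (MP4)"),
    (".mp2".toList, "MPEG-1"),
    (".mpg".toList, "MPEG-1"),
    (".mpeg".toList, "MPEG-1"),
    (".mpe".toList, "MPEG-1"),
    (".mpv".toList, "MPEG-1"),
    (".mxf".toList, "Material Exchange Format (MXF)"),
    (".nsv".toList, "Nullsoft Streaming Video (NSV)"),
    (".ogv".toList, "Ogg Video"),
    (".ogg".toList, "Ogg Video"),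
    (".rm".toList, "RealMedia (RM)"),
    (".rmvb".toList, "RealMedia Variable Bitrate (RMVB)"),
    (".roq".toList, "ROQ"),
    (".svi".toList, "SVI"),
    (".vob".toList, "Vob"),
    (".webm".toList, "WebM"),
    (".wmv".toList, "Windows Media Video"),
    (".yuv".toList, "Raw video format")
  ]

def is_movie_file_alt (file_n : String) : Option String :=
  let idx := PySem.Str.rfind file_n "."
  if idx = -1 then none
  else
    let ext := PySem.List.slice file_n.toList (some idx) none
    if pvVideoDict.contains (PySem.Chars.lower ext) then some (String.ofList ext) else none

-- ===== PRECONDITION & SPEC =====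
def Spec_is_movie_file (file_n : String) (out : Option String) : Prop := out = is_movie_file_alt file_n
instance (file_n : String) (out : Option String) : Decidable (Spec_is_movie_file file_n out) := by unfold Spec_is_movie_file; infer_instance

-- ===== CLAIM (what is proved, stated in full; the proofs are below) =====
def Claim_equal_is_movie_file : Prop := ∀ (file_n : String), Dom_is_movie_file file_n → Spec_is_movie_file file_n (is_movie_file file_n)

-- ===== LEMMAS AND PROOFS =====

-- "extension e matches file L": the tail of L of e's length, lowercased, is e
def pvMatch (L : List Char) (e : String) : Prop :=
  PySem.Chars.lower (L.drop (L.length - e.toList.length)) = e.toList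

lemma pvExts_pos : ∀ e ∈ pvExts, 0 < e.toList.length := by decide

-- no key is the (lowercase) dot-suffix of a different key, so at most one key can match a file
lemma pvExts_nosuffix : ∀ e1 ∈ pvExts, ∀ e2 ∈ pvExts, e1 ≠ e2 →
    e1.toList ≠ e2.toList.drop (e2.toList.length - e1.toList.length) := by decide

-- every key starts with '.' and contains no further dot
lemma pvExts_shape : ∀ e ∈ pvExts, e.toList.head? = some '.' ∧ '.' ∉ e.toList.tail := by decide

-- the dict's keys are exactly pvExts
set_option maxRecDepth 8000 in
lemma pvVideoDict_keys : pvVideoDict.keys = pvExts.map String.toList := by decide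

lemma lower_drop (l : List Char) (m : Nat) :
    PySem.Chars.lower (l.drop m) = (PySem.Chars.lower l).drop m := by
  simp [PySem.Chars.lower, List.map_drop]

lemma lower_length (l : List Char) : (PySem.Chars.lower l).length = l.length := by
  simp [PySem.Chars.lower]

lemma lowerChar_dot (c : Char) : PySem.Chars.lowerChar c = '.' ↔ c = '.' := by
  constructor
  · intro h
    unfold PySem.Chars.lowerChar at h
    split_ifs at h with hu
    · exfalso
      have h1 : ('A' : Char) ≤ c ∧ c ≤ ('Z' : Char) := by
        simpa [PySem.Chars.isupper] using hu
      have h65 : (65 : UInt32) ≤ c.val := h1.1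
      have h90 : c.val ≤ (90 : UInt32) := h1.2
      have h65' : 65 ≤ c.toNat := UInt32.le_iff_toNat_le.mp h65
      have h90' : c.toNat ≤ 90 := UInt32.le_iff_toNat_le.mp h90
      have hvalid : (c.toNat + 32).isValidChar := by
        left
        omega
      have hv : (Char.ofNat (c.toNat + 32)).toNat = c.toNat + 32 := by
        rw [Char.ofNat, dif_pos hvalid]
        rfl
      have h46 : (Char.ofNat (c.toNat + 32)).toNat = 46 := by rw [h]; rfl
      omega
    · exact h
  · intro h
    subst h
    decide

lemma pvMatch_le (L : List Char) (e : String) (hm : pvMatch L e) : e.toList.length ≤ L.length := by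
  have hlen : e.toList.length = L.length - (L.length - e.toList.length) := by
    conv_lhs => rw [← hm]
    rw [lower_length, List.length_drop]
  omega

lemma pvUniq_le (L : List Char) (e1 e2 : String) (h1 : e1 ∈ pvExts) (h2 : e2 ∈ pvExts)
    (m1 : pvMatch L e1) (m2 : pvMatch L e2) (hle : e1.toList.length ≤ e2.toList.length) :
    e1 = e2 := by
  by_contra hne
  have hl1 := pvMatch_le L e1 m1
  have hl2 := pvMatch_le L e2 m2
  have hdrop : L.drop (L.length - e1.toList.length)
      = (L.drop (L.length - e2.toList.length)).drop (e2.toList.length - e1.toList.length) := by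
    rw [List.drop_drop]
    congr 1
    omega
  have : e1.toList = e2.toList.drop (e2.toList.length - e1.toList.length) := by
    conv_lhs => rw [← m1, hdrop, lower_drop, m2]
  exact pvExts_nosuffix e1 h1 e2 h2 hne this

lemma pvUniq (L : List Char) (e1 e2 : String) (h1 : e1 ∈ pvExts) (h2 : e2 ∈ pvExts)
    (m1 : pvMatch L e1) (m2 : pvMatch L e2) : e1 = e2 := by
  rcases le_total e1.toList.length e2.toList.length with h | h
  · exact pvUniq_le L e1 e2 h1 h2 m1 m2 h
  · exact (pvUniq_le L e2 e1 h2 h1 m2 m1 h).symm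

lemma pvSlice_eq (L : List Char) (k : Nat) (hk : 0 < k) :
    PySem.List.slice L (some (-(k : Int))) none = L.drop (L.length - k) :=
  PySem.List.slice_from_neg_natCast L k hk

-- A's loop when no key matches
lemma pvLoopA_none (L : List Char) (hno : ∀ e ∈ pvExts, ¬ pvMatch L e) :
    ∀ ks : List String, (∀ e ∈ ks, e ∈ pvExts) → pvLoopA L ks = none := by
  intro ks
  induction ks with
  | nil => intro _; rfl
  | cons e rest ih =>
      intro hsub
      have he : e ∈ pvExts := hsub e (by simp)
      rw [pvLoopA]
      simp only [pvSlice_eq L _ (pvExts_pos e he)]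
      rw [if_neg (show ¬ _ = e.toList from hno e he)]
      exact ih (fun x hx => hsub x (by simp [hx]))

-- A's loop when the (unique) key e₀ matches
lemma pvLoopA_some (L : List Char) (e₀ : String) (h₀ : e₀ ∈ pvExts) (hm : pvMatch L e₀) :
    ∀ ks : List String, (∀ e ∈ ks, e ∈ pvExts) → e₀ ∈ ks →
      pvLoopA L ks = some (String.ofList (L.drop (L.length - e₀.toList.length))) := by
  intro ks
  induction ks with
  | nil => intro _ h; cases h
  | cons e rest ih =>
      intro hsub hmem
      have he : e ∈ pvExts := hsub e (by simp)
      rw [pvLoopA]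
      simp only [pvSlice_eq L _ (pvExts_pos e he)]
      by_cases hc : pvMatch L e
      · have heq : e = e₀ := pvUniq L e e₀ he h₀ hc hm
        rw [if_pos (show _ = e.toList from hc), heq]
      · rw [if_neg (show ¬ _ = e.toList from hc)]
        have : e₀ ∈ rest := by
          rcases List.mem_cons.mp hmem with h | h
          · exact absurd (h ▸ hm) hc
          · exact h
        exact ih (fun x hx => hsub x (by simp [hx])) this

lemma pvGo_zero (s sub : List Char) :
    PySem.Chars.rfind.go s sub 0 = if sub.isPrefixOf s then 0 else -1 := by
  simp [PySem.Chars.rfind.go]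

lemma pvGo_succ (s sub : List Char) (j : Nat) :
    PySem.Chars.rfind.go s sub (j+1)
      = if sub.isPrefixOf (s.drop (j+1)) then ((j : Int)+1) else PySem.Chars.rfind.go s sub j := by
  simp [PySem.Chars.rfind.go]

-- rfind.go: occurrence at m, none above ⇒ m
lemma pvGo_found (s sub : List Char) (m j : Nat) (hm : sub <+: s.drop m) (hmj : m ≤ j)
    (h : ∀ i, m < i → i ≤ j → ¬ sub <+: s.drop i) :
    PySem.Chars.rfind.go s sub j = (m : Int) := by
  induction j with
  | zero =>
      interval_cases m
      rw [pvGo_zero]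
      simp only [List.drop_zero] at hm
      rw [if_pos (List.isPrefixOf_iff_prefix.mpr hm)]
      simp
  | succ j ih =>
      rw [pvGo_succ]
      by_cases hc : m = j + 1
      · subst hc
        rw [if_pos (List.isPrefixOf_iff_prefix.mpr hm)]
        push_cast
        ring
      · rw [if_neg (by simpa [List.isPrefixOf_iff_prefix] using h (j+1) (by omega) le_rfl)]
        exact ih (by omega) (fun i hi hij => h i hi (by omega))

-- rfind.go: a non-(-1) result points at an occurrence
lemma pvGo_spec (s sub : List Char) (j : Nat) (h : PySem.Chars.rfind.go s sub j ≠ -1) :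
    ∃ m : Nat, PySem.Chars.rfind.go s sub j = (m : Int) ∧ sub <+: s.drop m := by
  induction j with
  | zero =>
      rw [pvGo_zero] at h ⊢
      by_cases hc : sub.isPrefixOf s
      · exact ⟨0, by rw [if_pos hc]; simp, by simpa [List.isPrefixOf_iff_prefix] using hc⟩
      · simp [hc] at h
  | succ j ih =>
      rw [pvGo_succ] at h ⊢
      by_cases hc : sub.isPrefixOf (s.drop (j+1))
      · exact ⟨j+1, by rw [if_pos hc]; push_cast; ring,
          by simpa [List.isPrefixOf_iff_prefix] using hc⟩
      · rw [if_neg hc] at h ⊢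
        exact ih h

-- ['.'] is a prefix iff the head is '.'
lemma pvDotPrefix (t : List Char) : ['.'] <+: t ↔ t.head? = some '.' := by
  cases t with
  | nil => simp
  | cons a l =>
      constructor
      · rintro ⟨u, hu⟩
        simp only [List.cons_append] at hu
        simp [← (List.cons.injEq _ _ _ _).mp hu |>.1]
      · intro h
        simp only [List.head?_cons, Option.some.injEq] at h
        exact ⟨l, by rw [h]; rfl⟩

-- if key e matches L, the last '.' of L sits exactly at L.length - |e|
lemma pvRfind_of_match (L : List Char) (e : String) (he : e ∈ pvExts) (hm : pvMatch L e) :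
    PySem.Chars.rfind L ['.'] = ((L.length - e.toList.length : Nat) : Int) := by
  have hle := pvMatch_le L e hm
  obtain ⟨hhead, htail⟩ := pvExts_shape e he
  have hpos := pvExts_pos e he
  have hm' : pvMatch L e := hm
  unfold pvMatch at hm'
  have hdot : (L.drop (L.length - e.toList.length)).head? = some '.' := by
    have h1 := congrArg List.head? hm'
    rw [PySem.Chars.lower, List.head?_map] at h1
    rw [hhead] at h1
    cases hh : (L.drop (L.length - e.toList.length)).head? with
    | none => rw [hh] at h1; simp at h1
    | some c =>
        rw [hh] at h1
        simp only [Option.map_some, Option.some.injEq] at h1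
        rw [(lowerChar_dot c).mp h1]
  have hpre : ['.'] <+: L.drop (L.length - e.toList.length) := (pvDotPrefix _).mpr hdot
  have hno : ∀ i, L.length - e.toList.length < i → i ≤ L.length → ¬ ['.'] <+: L.drop i := by
    intro i hi hiL hcon
    have hd : L[i]? = some '.' := by
      have h0 := (pvDotPrefix _).mp hcon
      rwa [List.head?_drop] at h0
    have hiL' : i < L.length := by
      by_contra hcon2
      rw [List.getElem?_eq_none (by omega)] at hd
      simp at hd
    have hk1 : 1 ≤ i - (L.length - e.toList.length) := by omega
    have hkl : i - (L.length - e.toList.length) < e.toList.length := by omega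
    have h1 : (PySem.Chars.lower (L.drop (L.length - e.toList.length)))[i - (L.length - e.toList.length)]? = some '.' := by
      rw [PySem.Chars.lower, List.getElem?_map, List.getElem?_drop,
        show L.length - e.toList.length + (i - (L.length - e.toList.length)) = i by omega, hd,
        Option.map_some, show PySem.Chars.lowerChar '.' = '.' from by decide]
    rw [hm'] at h1
    have hdotmem : '.' ∈ e.toList.tail := by
      have h2 : e.toList.tail[i - (L.length - e.toList.length) - 1]? = some '.' := by
        rw [← List.drop_one, List.getElem?_drop,
          show 1 + (i - (L.length - e.toList.length) - 1) = i - (L.length - e.toList.length) by omega]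
        exact h1
      exact List.mem_of_getElem? h2
    exact htail hdotmem
  unfold PySem.Chars.rfind
  exact pvGo_found L ['.'] (L.length - e.toList.length) L.length hpre (by omega) hno

-- if no key matches L and rfind found a dot at m, the extension from m is not a key
lemma pvNoKey_of_nomatch (L : List Char) (m : Nat) (hpre : ['.'] <+: L.drop m)
    (hno : ∀ e ∈ pvExts, ¬ pvMatch L e) :
    pvVideoDict.contains (PySem.Chars.lower (L.drop m)) = false := by
  rw [PySem.Dict.contains_eq_decide_mem_keys, pvVideoDict_keys]
  rw [decide_eq_false_iff_not]
  intro hmem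
  obtain ⟨e, he, hEq⟩ := List.mem_map.mp hmem
  have hmL : m < L.length := by
    by_contra hcon
    rw [List.drop_eq_nil_of_le (by omega)] at hpre
    simp at hpre
  have hlen : e.toList.length = L.length - m := by
    rw [hEq, lower_length, List.length_drop]
  have : pvMatch L e := by
    unfold pvMatch
    rw [hlen, show L.length - (L.length - m) = m by omega]
    exact hEq.symm
  exact hno e he this

lemma pvMain (L : List Char) :
    pvLoopA L pvExts =
      (let idx := PySem.Chars.rfind L ['.']
       if idx = -1 then none
       else
         let ext := PySem.List.slice L (some idx) none
         if pvVideoDict.contains (PySem.Chars.lower ext) then some (String.ofList ext) else none) := by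
  simp only []
  by_cases h : ∃ e ∈ pvExts, pvMatch L e
  · obtain ⟨e₀, h₀, hm⟩ := h
    rw [pvLoopA_some L e₀ h₀ hm pvExts (fun _ hx => hx) h₀]
    rw [pvRfind_of_match L e₀ h₀ hm]
    rw [if_neg (by omega)]
    rw [PySem.List.slice_from_natCast]
    have hcont : pvVideoDict.contains (PySem.Chars.lower (L.drop (L.length - e₀.toList.length))) = true := by
      rw [PySem.Dict.contains_eq_decide_mem_keys, pvVideoDict_keys]
      rw [decide_eq_true_iff]
      rw [show PySem.Chars.lower (L.drop (L.length - e₀.toList.length)) = e₀.toList from hm]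
      exact List.mem_map.mpr ⟨e₀, h₀, rfl⟩
    rw [if_pos hcont]
  · push Not at h
    rw [pvLoopA_none L h pvExts (fun _ hx => hx)]
    by_cases hr : PySem.Chars.rfind L ['.'] = -1
    · rw [if_pos hr]
    · obtain ⟨m, hmEq, hpre⟩ := pvGo_spec L ['.'] L.length hr
      rw [show PySem.Chars.rfind L ['.'] = PySem.Chars.rfind.go L ['.'] L.length from rfl] at hr ⊢
      rw [hmEq]
      rw [if_neg (by omega)]
      rw [PySem.List.slice_from_natCast]
      rw [if_neg (by rw [pvNoKey_of_nomatch L m hpre h]; simp)]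

-- ===== VERDICT (by name: the statement is the Claim_ definition above) =====
theorem is_movie_file_spec : Claim_equal_is_movie_file := by
  intro file_n _
  unfold Spec_is_movie_file is_movie_file is_movie_file_alt
  rw [pvMain file_n.toList]
  simp [PySem.Str.rfind]
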